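-- pv_equiv track=rewrite | github.com/djimenez/aoc | aoc2020/11/main.py | create_seat_lookups
-- ===== SOURCE A (Python) =====
-- def index(stride, x, y):
--     return y * stride + x
--
-- def find_seat(layout, stride, x, y, dx, dy, part2):
--     max_x = stride - 1
--     max_y = (len(layout) // stride) - 1
--
--     while True:
--         if x == 0 and dx < 0 or y == 0 and dy < 0 or x == max_x and dx > 0 or y == max_y and dy > 0:
--             return None
--
--         x += dx
--         y += dy
--         seat_index = index(stride, x, y)
--
--         if layout[seat_index] != ".":
--             return seat_index
--
--         if not part2:
--             return None
--
-- def add_seat(lookup, layout, stride, x, y, dx, dy, part2):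
--     seat_index = find_seat(layout, stride, x, y, dx, dy, part2)
--
--     if seat_index is not None:
--         lookup.append(seat_index)
--
-- def create_seat_lookups(layout, stride, part2 = False):
--     lookups = []
--
--     max_x = stride - 1
--     max_y = (len(layout) // stride) - 1
--
--     for y in range(max_y + 1):
--         for x in range(max_x + 1):
--             lookup = []
--             lookups.append(lookup)
--
--             add_seat(lookup, layout, stride, x, y, -1, -1, part2)
--             add_seat(lookup, layout, stride, x, y, 0, -1, part2)
--             add_seat(lookup, layout, stride, x, y, 1, -1, part2)
--
--             add_seat(lookup, layout, stride, x, y, -1, 0, part2)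
--             add_seat(lookup, layout, stride, x, y, 1, 0, part2)
--
--             add_seat(lookup, layout, stride, x, y, -1, 1, part2)
--             add_seat(lookup, layout, stride, x, y, 0, 1, part2)
--             add_seat(lookup, layout, stride, x, y, 1, 1, part2)
--
--     return lookups
-- ===== SOURCE B (Python) =====
-- def create_seat_lookups(layout, stride, part2=False):
--     # Directional sweep DP: for each of the 8 directions fill a nearest-seat
--     # table in one pass, reusing the adjacent cell's already-computed entry
--     # instead of rescanning each ray.
--     w = stride
--     h = max(len(layout) // stride, 0)
--     n = w * h
--     dirs = [(-1, -1), (0, -1), (1, -1), (-1, 0), (1, 0), (-1, 1), (0, 1), (1, 1)]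
--     tables = []
--     for dx, dy in dirs:
--         backward = dy < 0 or (dy == 0 and dx < 0)
--         order = range(n) if backward else range(n - 1, -1, -1)
--         nearest = [None] * n
--         for i in order:
--             x, y = i % w, i // w
--             nx, ny = x + dx, y + dy
--             if 0 <= nx < w and 0 <= ny < h:
--                 j = ny * w + nx
--                 if layout[j] != ".":
--                     nearest[i] = j
--                 elif part2:
--                     nearest[i] = nearest[j]
--         tables.append(nearest)
--     return [[t[y * w + x] for t in tables if t[y * w + x] is not None]
--             for y in range(h) for x in range(w)]
-- ===== Notes on version B (the rewrite author's own statement) =====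
-- stated objective: alternative
-- what changed: Replaced the per-cell 8-direction ray rescans with eight directional sweep-DP passes (ascending row-major for up/left directions, descending for down/right) that fill a nearest-visible-seat table per direction by reusing the already-computed entry of the adjacent cell.
import Mathlib
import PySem

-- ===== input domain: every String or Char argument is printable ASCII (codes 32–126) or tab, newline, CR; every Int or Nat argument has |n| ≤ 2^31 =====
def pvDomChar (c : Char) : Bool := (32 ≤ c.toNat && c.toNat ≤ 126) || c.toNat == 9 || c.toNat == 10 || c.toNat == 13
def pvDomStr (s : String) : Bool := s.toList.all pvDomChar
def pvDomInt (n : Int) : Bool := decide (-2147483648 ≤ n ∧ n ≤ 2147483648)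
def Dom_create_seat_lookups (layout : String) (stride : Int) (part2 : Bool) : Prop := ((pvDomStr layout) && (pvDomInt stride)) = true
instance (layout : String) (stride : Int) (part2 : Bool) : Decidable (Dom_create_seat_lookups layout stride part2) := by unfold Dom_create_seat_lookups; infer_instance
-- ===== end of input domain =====

-- B replaces A's per-cell 8-direction ray rescans with eight one-pass directional
-- sweeps that reuse the neighbouring cell's already-computed answer (objective: alternative).

-- ===== PORT A =====
-- find_seat: the while loop becomes fuel recursion (fuel is a totality guard only;
-- the callers pass fuel larger than the number of iterations the Python loop can make).
def pvFindSeatA (cs : List Char) (stride : Int) (part2 : Bool) (dx dy maxX maxY : Int) :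
    Nat → Int → Int → Option Int
  | 0, _, _ => none
  | Nat.succ fuel, x, y =>
    if (x = 0 ∧ dx < 0) ∨ (y = 0 ∧ dy < 0) ∨ (x = maxX ∧ dx > 0) ∨ (y = maxY ∧ dy > 0) then
      none
    else
      let x' := x + dx
      let y' := y + dy
      let si := y' * stride + x'
      -- layout[seat_index]: in-range whenever the Python code reaches it, so getD is exact here
      if (PySem.List.pyGet? cs si).getD '.' ≠ '.' then some si
      else if !part2 then none
      else pvFindSeatA cs stride part2 dx dy maxX maxY fuel x' y'

def pvAddSeatA (cs : List Char) (stride : Int) (part2 : Bool) (x y dx dy maxX maxY : Int)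
    (fuel : Nat) (lookup : List Int) : List Int :=
  match pvFindSeatA cs stride part2 dx dy maxX maxY fuel x y with
  | none => lookup
  | some s => lookup ++ [s]

def create_seat_lookups (layout : String) (stride : Int) (part2 : Bool) : List (List Int) :=
  let cs := layout.toList
  let maxX := stride - 1
  let maxY := PySem.Int.floordiv (cs.length : Int) stride - 1
  let fuel := cs.length + stride.toNat + 2
  (PySem.List.pyRange 0 (maxY + 1) 1).foldl (fun lookups y =>
    (PySem.List.pyRange 0 (maxX + 1) 1).foldl (fun lookups x =>
      let l0 : List Int := []
      let l1 := pvAddSeatA cs stride part2 x y (-1) (-1) maxX maxY fuel l0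
      let l2 := pvAddSeatA cs stride part2 x y 0 (-1) maxX maxY fuel l1
      let l3 := pvAddSeatA cs stride part2 x y 1 (-1) maxX maxY fuel l2
      let l4 := pvAddSeatA cs stride part2 x y (-1) 0 maxX maxY fuel l3
      let l5 := pvAddSeatA cs stride part2 x y 1 0 maxX maxY fuel l4
      let l6 := pvAddSeatA cs stride part2 x y (-1) 1 maxX maxY fuel l5
      let l7 := pvAddSeatA cs stride part2 x y 0 1 maxX maxY fuel l6
      let l8 := pvAddSeatA cs stride part2 x y 1 1 maxX maxY fuel l7
      lookups ++ [l8]) lookups) []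

-- ===== PORT B =====
def pvDirs : List (Int × Int) := [(-1,-1), (0,-1), (1,-1), (-1,0), (1,0), (-1,1), (0,1), (1,1)]

def pvSweepStep (cs : List Char) (w h dx dy : Int) (part2 : Bool)
    (arr : Array (Option Int)) (i : Int) : Array (Option Int) :=
  let x := PySem.Int.mod i w
  let y := PySem.Int.floordiv i w
  if 0 ≤ x + dx ∧ x + dx < w ∧ 0 ≤ y + dy ∧ y + dy < h then
    let j := (y + dy) * w + (x + dx)
    if (PySem.List.pyGet? cs j).getD '.' ≠ '.' then arr.setIfInBounds i.toNat (some j)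
    else if part2 then arr.setIfInBounds i.toNat (arr.getD j.toNat none)
    else arr
  else arr

def pvSweep (cs : List Char) (w h dx dy : Int) (part2 : Bool) (ord : List Int) :
    Array (Option Int) :=
  ord.foldl (pvSweepStep cs w h dx dy part2) (Array.replicate (w * h).toNat none)

def create_seat_lookups_alt (layout : String) (stride : Int) (part2 : Bool) : List (List Int) :=
  let cs := layout.toList
  let w := stride
  let h := max (PySem.Int.floordiv (cs.length : Int) stride) 0
  let n := w * h
  let tables := pvDirs.map (fun d =>
    let ord := if d.2 < 0 ∨ (d.2 = 0 ∧ d.1 < 0)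
      then PySem.List.pyRange 0 n 1
      else PySem.List.pyRange (n - 1) (-1) (-1)
    pvSweep cs w h d.1 d.2 part2 ord)
  (PySem.List.pyRange 0 h 1).flatMap (fun y =>
    (PySem.List.pyRange 0 w 1).map (fun x =>
      tables.filterMap (fun t => t.getD (y * w + x).toNat none)))

-- ===== PRECONDITION & SPEC =====
-- Python A raises ZeroDivisionError (len(layout) // stride) exactly when stride = 0.
def Pre_create_seat_lookups (layout : String) (stride : Int) (part2 : Bool) : Prop := stride ≠ 0
instance (layout : String) (stride : Int) (part2 : Bool) : Decidable (Pre_create_seat_lookups layout stride part2) := by unfold Pre_create_seat_lookups; infer_instance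

def pvWitness_create_seat_lookups : String × Int × Bool := ("L.L#", 2, true)

def Spec_create_seat_lookups (layout : String) (stride : Int) (part2 : Bool) (out : List (List Int)) : Prop := out = create_seat_lookups_alt layout stride part2
instance (layout : String) (stride : Int) (part2 : Bool) (out : List (List Int)) : Decidable (Spec_create_seat_lookups layout stride part2 out) := by unfold Spec_create_seat_lookups; infer_instance

-- ===== CLAIM (what is proved, stated in full; the proofs are below) =====
def Claim_equal_create_seat_lookups : Prop := ∀ (layout : String) (stride : Int) (part2 : Bool), Dom_create_seat_lookups layout stride part2 → Pre_create_seat_lookups layout stride part2 → Spec_create_seat_lookups layout stride part2 (create_seat_lookups layout stride part2)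

-- ===== LEMMAS AND PROOFS =====

-- The common specification both ports are reduced to: the first seat visible from
-- (x, y) in direction (dx, dy) (one step only when part2 is false).
def pvVis (cs : List Char) (w h dx dy : Int) (part2 : Bool) (x y : Int) : Option Int :=
  if hg : 0 ≤ x + dx ∧ x + dx < w ∧ 0 ≤ y + dy ∧ y + dy < h then
    if (PySem.List.pyGet? cs ((y + dy) * w + (x + dx))).getD '.' ≠ '.' then
      some ((y + dy) * w + (x + dx))
    else if hp : part2 ∧ (dx ≠ 0 ∨ dy ≠ 0) then
      pvVis cs w h dx dy part2 (x + dx) (y + dy)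
    else none
  else none
termination_by (if 0 < dx then (w - x).toNat else if dx < 0 then (x + 1).toNat
  else if 0 < dy then (h - y).toNat else (y + 1).toNat)
decreasing_by
  obtain ⟨h1, h2, h3, h4⟩ := hg
  obtain ⟨hp2, hd⟩ := hp
  rcases hd with hd | hd <;> split_ifs <;> omega

def pvMu (w h dx dy x y : Int) : Nat :=
  if 0 < dx then (w - x).toNat else if dx < 0 then (x + 1).toNat
  else if 0 < dy then (h - y).toNat else (y + 1).toNat

-- the cell whose table entry cell i's sweep value is copied from (part2 floor case)
def pvDep (cs : List Char) (w h dx dy : Int) (part2 : Bool) (i : Int) : Option Int :=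
  let x := PySem.Int.mod i w
  let y := PySem.Int.floordiv i w
  if 0 ≤ x + dx ∧ x + dx < w ∧ 0 ≤ y + dy ∧ y + dy < h then
    if (PySem.List.pyGet? cs ((y + dy) * w + (x + dx))).getD '.' ≠ '.' then none
    else if part2 then some ((y + dy) * w + (x + dx))
    else none
  else none

lemma pv_coords (w nx ny : Int) (hw : 0 < w) (h1 : 0 ≤ nx) (h2 : nx < w) :
    PySem.Int.mod (ny * w + nx) w = nx ∧ PySem.Int.floordiv (ny * w + nx) w = ny := by
  rw [PySem.Int.mod_eq_emod_of_pos hw, PySem.Int.floordiv_eq_ediv_of_pos hw,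
    show ny * w + nx = nx + w * ny by ring, Int.add_mul_emod_self_left,
    Int.add_mul_ediv_left nx ny hw.ne', Int.emod_eq_of_lt h1 h2,
    Int.ediv_eq_zero_of_lt h1 h2]
  exact ⟨rfl, by ring⟩

lemma pv_cell_facts (w h i : Int) (hw : 0 < w) (h0 : 0 ≤ i) (hn : i < w * h) :
    0 ≤ PySem.Int.mod i w ∧ PySem.Int.mod i w < w ∧
    0 ≤ PySem.Int.floordiv i w ∧ PySem.Int.floordiv i w < h ∧
    PySem.Int.floordiv i w * w + PySem.Int.mod i w = i := by
  rw [PySem.Int.mod_eq_emod_of_pos hw, PySem.Int.floordiv_eq_ediv_of_pos hw]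
  refine ⟨Int.emod_nonneg i hw.ne', Int.emod_lt_of_pos i hw, Int.ediv_nonneg h0 hw.le, ?_, ?_⟩
  · rw [Int.ediv_lt_iff_lt_mul hw]; linarith [mul_comm w h]
  · have := Int.mul_ediv_add_emod i w; linarith

lemma pv_grid_index_bounds (w h nx ny : Int) (hw : 0 < w)
    (h1 : 0 ≤ nx) (h2 : nx < w) (h3 : 0 ≤ ny) (h4 : ny < h) :
    0 ≤ ny * w + nx ∧ ny * w + nx < w * h := by
  constructor
  · have := mul_nonneg h3 hw.le; omega
  · have h5 : ny * w ≤ (h - 1) * w := mul_le_mul_of_nonneg_right (by omega) hw.le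
    nlinarith

lemma pv_findA_eq_vis (cs : List Char) (w h dx dy : Int) (part2 : Bool)
    (hw : 0 < w) (hdx1 : -1 ≤ dx) (hdx2 : dx ≤ 1) (hdy1 : -1 ≤ dy) (hdy2 : dy ≤ 1)
    (hd0 : dx ≠ 0 ∨ dy ≠ 0) :
    ∀ (fuel : Nat) (x y : Int), 0 ≤ x → x < w → 0 ≤ y → y < h →
      pvMu w h dx dy x y ≤ fuel →
      pvFindSeatA cs w part2 dx dy (w - 1) (h - 1) fuel x y =
        pvVis cs w h dx dy part2 x y := by
  intro fuel
  induction fuel with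
  | zero =>
    intro x y hx0 hxw hy0 hyh hmu
    exfalso
    unfold pvMu at hmu
    split_ifs at hmu <;> omega
  | succ fuel ih =>
    intro x y hx0 hxw hy0 hyh hmu
    have hiff : ((x = 0 ∧ dx < 0) ∨ (y = 0 ∧ dy < 0) ∨ (x = w - 1 ∧ dx > 0) ∨ (y = h - 1 ∧ dy > 0)) ↔
        ¬(0 ≤ x + dx ∧ x + dx < w ∧ 0 ≤ y + dy ∧ y + dy < h) := by omega
    rw [pvVis]
    simp only [pvFindSeatA]
    by_cases hg : 0 ≤ x + dx ∧ x + dx < w ∧ 0 ≤ y + dy ∧ y + dy < h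
    · rw [if_neg (fun hc => (hiff.mp hc) hg), dif_pos hg]
      by_cases hs : (PySem.List.pyGet? cs ((y + dy) * w + (x + dx))).getD '.' ≠ '.'
      · rw [if_pos hs, if_pos hs]
      · rw [if_neg hs, if_neg hs]
        cases part2 with
        | false => simp
        | true =>
          simp only [Bool.not_true, Bool.false_eq_true, if_false, true_and]
          rw [dif_pos hd0]
          have hdec : pvMu w h dx dy (x + dx) (y + dy) < pvMu w h dx dy x y := by
            unfold pvMu
            rcases hd0 with hd | hd <;> split_ifs <;> omega
          exact ih (x + dx) (y + dy) hg.1 hg.2.1 hg.2.2.1 hg.2.2.2 (by omega)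
    · rw [if_pos (hiff.mpr hg), dif_neg hg]

lemma pv_dep_range (cs : List Char) (w h dx dy : Int) (part2 : Bool) (i j : Int)
    (hw : 0 < w) (h0 : 0 ≤ i) (hn : i < w * h)
    (hdep : pvDep cs w h dx dy part2 i = some j) : 0 ≤ j ∧ j < w * h := by
  simp only [pvDep] at hdep
  split_ifs at hdep with hg hc hp
  rw [Option.some.injEq] at hdep
  obtain ⟨a1, a2, a3, a4⟩ := hg
  have hb := pv_grid_index_bounds w h _ _ hw a1 a2 a3 a4
  rw [hdep] at hb
  exact hb


lemma pv_sweep_fold_spec (cs : List Char) (w h dx dy : Int) (part2 : Bool)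
    (key : Int → Int) (hw : 0 < w)
    (hkey : ∀ i j : Int, 0 ≤ i → i < w * h → pvDep cs w h dx dy part2 i = some j →
      key j < key i) :
    ∀ (ord : List Int) (arr : Array (Option Int)),
      arr.size = (w * h).toNat →
      ord.Pairwise (fun a b => key a < key b) →
      (∀ i ∈ ord, 0 ≤ i ∧ i < w * h) →
      (∀ i ∈ ord, arr.getD i.toNat none = none) →
      (∀ i ∈ ord, ∀ j, pvDep cs w h dx dy part2 i = some j → j ∉ ord →
        arr.getD j.toNat none =
          pvVis cs w h dx dy part2 (PySem.Int.mod j w) (PySem.Int.floordiv j w)) →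
      (ord.foldl (pvSweepStep cs w h dx dy part2) arr).size = arr.size ∧
      (∀ j : Int, 0 ≤ j → j ∉ ord →
        (ord.foldl (pvSweepStep cs w h dx dy part2) arr).getD j.toNat none =
          arr.getD j.toNat none) ∧
      (∀ i ∈ ord,
        (ord.foldl (pvSweepStep cs w h dx dy part2) arr).getD i.toNat none =
          pvVis cs w h dx dy part2 (PySem.Int.mod i w) (PySem.Int.floordiv i w)) := by
  intro ord
  induction ord with
  | nil =>
    intro arr _ _ _ _ _
    exact ⟨rfl, fun _ _ _ => rfl, fun i hi => absurd hi List.not_mem_nil⟩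
  | cons a tl ih =>
    intro arr hsize hpw hmem hnone hdone
    obtain ⟨ha0, han⟩ := hmem a List.mem_cons_self
    have haton : a.toNat < arr.size := by rw [hsize]; omega
    have hdep_notin : ∀ j, pvDep cs w h dx dy part2 a = some j → j ∉ a :: tl := by
      intro j hj hmemj
      have hk := hkey a j ha0 han hj
      rcases List.mem_cons.mp hmemj with rfl | hjt
      · exact lt_irrefl _ hk
      · exact absurd ((List.pairwise_cons.mp hpw).1 j hjt) (by omega)
    have hstep_size : (pvSweepStep cs w h dx dy part2 arr a).size = arr.size := by
      simp only [pvSweepStep]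
      split_ifs <;> simp [Array.size_setIfInBounds]
    have hstep_other : ∀ k : Nat, k ≠ a.toNat →
        (pvSweepStep cs w h dx dy part2 arr a).getD k none = arr.getD k none := by
      intro k hk
      simp only [pvSweepStep]
      split_ifs <;>
        simp [Array.getD_eq_getD_getElem?, Ne.symm hk]
    have hstep_self : (pvSweepStep cs w h dx dy part2 arr a).getD a.toNat none =
        pvVis cs w h dx dy part2 (PySem.Int.mod a w) (PySem.Int.floordiv a w) := by
      obtain ⟨cf1, cf2, cf3, cf4, cf5⟩ := pv_cell_facts w h a hw ha0 han
      simp only [pvSweepStep]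
      rw [pvVis]
      by_cases hg : 0 ≤ PySem.Int.mod a w + dx ∧ PySem.Int.mod a w + dx < w ∧
          0 ≤ PySem.Int.floordiv a w + dy ∧ PySem.Int.floordiv a w + dy < h
      · rw [if_pos hg, dif_pos hg]
        by_cases hs : (PySem.List.pyGet? cs
            ((PySem.Int.floordiv a w + dy) * w + (PySem.Int.mod a w + dx))).getD '.' ≠ '.'
        · rw [if_pos hs, if_pos hs]
          simp [Array.getD_eq_getD_getElem?, haton]
        · rw [if_neg hs, if_neg hs]
          cases part2 with
          | false => simp [hnone a List.mem_cons_self]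
          | true =>
            rw [if_pos rfl]
            have hwr : (arr.setIfInBounds a.toNat
                (arr.getD ((PySem.Int.floordiv a w + dy) * w + (PySem.Int.mod a w + dx)).toNat
                  none)).getD a.toNat none =
                arr.getD ((PySem.Int.floordiv a w + dy) * w + (PySem.Int.mod a w + dx)).toNat
                  none := by
              simp [Array.getD_eq_getD_getElem?, haton]
            rw [hwr]
            by_cases hd : dx ≠ 0 ∨ dy ≠ 0
            · rw [dif_pos (And.intro rfl hd)]
              have hdep : pvDep cs w h dx dy true a =
                  some ((PySem.Int.floordiv a w + dy) * w + (PySem.Int.mod a w + dx)) := by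
                simp only [pvDep]
                rw [if_pos hg, if_neg hs]; simp
              have hres := hdone a List.mem_cons_self _ hdep (hdep_notin _ hdep)
              obtain ⟨hc1, hc2⟩ := pv_coords w (PySem.Int.mod a w + dx)
                (PySem.Int.floordiv a w + dy) hw hg.1 hg.2.1
              rw [hres, hc1, hc2]
            · rw [dif_neg (fun hc => hd hc.2)]
              have hd1 : dx = 0 := by omega
              have hd2 : dy = 0 := by omega
              rw [hd1, hd2]
              have hj : (PySem.Int.floordiv a w + 0) * w + (PySem.Int.mod a w + 0) = a := by
                rw [add_zero, add_zero]; omega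
              rw [hj]
              exact hnone a List.mem_cons_self
      · rw [if_neg hg, dif_neg hg]
        exact hnone a List.mem_cons_self
    have htl := ih (pvSweepStep cs w h dx dy part2 arr a)
      (by rw [hstep_size]; exact hsize)
      (List.pairwise_cons.mp hpw).2
      (fun i hi => hmem i (List.mem_cons_of_mem _ hi))
      (fun i hi => by
        have hia : i ≠ a := by
          intro hia
          subst hia
          exact absurd ((List.pairwise_cons.mp hpw).1 i hi) (by omega)
        have := hmem i (List.mem_cons_of_mem _ hi)
        rw [hstep_other i.toNat (by omega)]
        exact hnone i (List.mem_cons_of_mem _ hi))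
      (fun i hi j hj hjn => by
        by_cases hja : j = a
        · subst hja
          rw [hstep_self]
        · obtain ⟨hi0, hin⟩ := hmem i (List.mem_cons_of_mem _ hi)
          obtain ⟨hj0, hjn'⟩ := pv_dep_range cs w h dx dy part2 i j hw hi0 hin hj
          rw [hstep_other j.toNat (by omega)]
          exact hdone i (List.mem_cons_of_mem _ hi) j hj
            (by simp only [List.mem_cons, not_or]; exact ⟨hja, hjn⟩))
    obtain ⟨s1, s2, s3⟩ := htl
    have hant : a ∉ tl := fun hat =>
      absurd ((List.pairwise_cons.mp hpw).1 a hat) (by omega)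
    refine ⟨?_, ?_, ?_⟩
    · rw [List.foldl_cons, s1, hstep_size]
    · intro j hj0 hjn
      simp only [List.mem_cons, not_or] at hjn
      rw [List.foldl_cons, s2 j hj0 hjn.2, hstep_other j.toNat (by omega)]
    · intro i hi
      rcases List.mem_cons.mp hi with rfl | hit
      · rw [List.foldl_cons, s2 i ha0 hant, hstep_self]
      · rw [List.foldl_cons]
        exact s3 i hit

lemma pv_dep_lt (cs : List Char) (w h dx dy : Int) (part2 : Bool) (i j : Int)
    (hw : 0 < w) (hback : dy < 0 ∨ (dy = 0 ∧ dx < 0)) (h0 : 0 ≤ i) (hn : i < w * h)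
    (hdep : pvDep cs w h dx dy part2 i = some j) : j < i := by
  simp only [pvDep] at hdep
  split_ifs at hdep with hg hc hp
  rw [Option.some.injEq] at hdep
  obtain ⟨cf1, cf2, cf3, cf4, cf5⟩ := pv_cell_facts w h i hw h0 hn
  set x := PySem.Int.mod i w with hx
  set y := PySem.Int.floordiv i w with hy
  obtain ⟨a1, a2, a3, a4⟩ := hg
  have hexp : (y + dy) * w + (x + dx) = (y * w + x) + (dy * w + dx) := by ring
  rcases hback with hb | ⟨hb1, hb2⟩
  · have h5 : dy * w ≤ (-1) * w := mul_le_mul_of_nonneg_right (by omega) hw.le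
    rw [neg_one_mul] at h5
    have h6 : dx ≤ w - 1 := by omega
    linarith
  · subst hb1; simp only [zero_mul, zero_add] at hexp; linarith

lemma pv_dep_gt (cs : List Char) (w h dx dy : Int) (part2 : Bool) (i j : Int)
    (hw : 0 < w) (hfwd : 0 < dy ∨ (dy = 0 ∧ 0 < dx)) (h0 : 0 ≤ i) (hn : i < w * h)
    (hdep : pvDep cs w h dx dy part2 i = some j) : i < j := by
  simp only [pvDep] at hdep
  split_ifs at hdep with hg hc hp
  rw [Option.some.injEq] at hdep
  obtain ⟨cf1, cf2, cf3, cf4, cf5⟩ := pv_cell_facts w h i hw h0 hn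
  set x := PySem.Int.mod i w with hx
  set y := PySem.Int.floordiv i w with hy
  obtain ⟨a1, a2, a3, a4⟩ := hg
  have hexp : (y + dy) * w + (x + dx) = (y * w + x) + (dy * w + dx) := by ring
  rcases hfwd with hb | ⟨hb1, hb2⟩
  · have h5 : 1 * w ≤ dy * w := mul_le_mul_of_nonneg_right (by omega) hw.le
    rw [one_mul] at h5
    have h6 : -(w - 1) ≤ dx := by omega
    linarith
  · subst hb1; simp only [zero_mul, zero_add] at hexp; linarith

lemma pv_sweep_getD (cs : List Char) (w h dx dy : Int) (part2 : Bool) (i : Int)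
    (hw : 0 < w) (hd : (dx, dy) ∈ pvDirs) (h0 : 0 ≤ i) (hn : i < w * h) :
    (pvSweep cs w h dx dy part2
        (if dy < 0 ∨ (dy = 0 ∧ dx < 0) then PySem.List.pyRange 0 (w * h) 1
         else PySem.List.pyRange (w * h - 1) (-1) (-1))).getD i.toNat none =
      pvVis cs w h dx dy part2 (PySem.Int.mod i w) (PySem.Int.floordiv i w) := by
  have hrep : ∀ k : Nat, (Array.replicate (w * h).toNat (none : Option Int)).getD k none = none := by
    intro k
    rw [Array.getD_eq_getD_getElem?, Array.getElem?_replicate]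
    split_ifs <;> rfl
  have main : ∀ (key : Int → Int) (ord : List Int),
      (∀ i2 j : Int, 0 ≤ i2 → i2 < w * h → pvDep cs w h dx dy part2 i2 = some j → key j < key i2) →
      ord.Pairwise (fun a b => key a < key b) →
      (∀ i2 ∈ ord, 0 ≤ i2 ∧ i2 < w * h) →
      (∀ m : Int, 0 ≤ m → m < w * h → m ∈ ord) →
      (pvSweep cs w h dx dy part2 ord).getD i.toNat none =
        pvVis cs w h dx dy part2 (PySem.Int.mod i w) (PySem.Int.floordiv i w) := by
    intro key ord hkey hpw hmem hcover
    have hspec := pv_sweep_fold_spec cs w h dx dy part2 key hw hkey ord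
      (Array.replicate (w * h).toNat none) (by simp) hpw hmem (fun i2 _ => hrep _)
      (fun i2 hi2 j hj hjn => by
        obtain ⟨hj0, hjn'⟩ := pv_dep_range cs w h dx dy part2 i2 j hw (hmem i2 hi2).1
          (hmem i2 hi2).2 hj
        exact absurd (hcover j hj0 hjn') hjn)
    exact hspec.2.2 i (hcover i h0 hn)
  by_cases hb : dy < 0 ∨ (dy = 0 ∧ dx < 0)
  · rw [if_pos hb]
    exact main (fun m => m) _
      (fun i2 j h1 h2 h3 => pv_dep_lt cs w h dx dy part2 i2 j hw hb h1 h2 h3)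
      (by simpa using PySem.List.pairwise_lt_pyRange_one 0 (w * h))
      (fun i2 hi2 => PySem.List.mem_pyRange_one.mp hi2)
      (fun m hm0 hmn => PySem.List.mem_pyRange_one.mpr ⟨hm0, hmn⟩)
  · rw [if_neg hb]
    have hf : 0 < dy ∨ (dy = 0 ∧ 0 < dx) := by
      simp only [pvDirs, List.mem_cons, List.not_mem_nil, or_false, Prod.mk.injEq] at hd
      rcases hd with ⟨h1,h2⟩|⟨h1,h2⟩|⟨h1,h2⟩|⟨h1,h2⟩|⟨h1,h2⟩|⟨h1,h2⟩|⟨h1,h2⟩|⟨h1,h2⟩ <;>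
        subst h1 <;> subst h2 <;> omega
    have hord : PySem.List.pyRange (w * h - 1) (-1) (-1) =
        (PySem.List.pyRange 0 (w * h) 1).reverse := by
      have hr := PySem.List.pyRange_neg_one_eq_reverse (w * h - 1) (-1)
      rw [show (-1 : Int) + 1 = 0 from by norm_num, show w * h - 1 + 1 = w * h from by ring] at hr
      exact hr
    rw [hord]
    exact main (fun m => -m) _
      (fun i2 j h1 h2 h3 => by
        have := pv_dep_gt cs w h dx dy part2 i2 j hw hf h1 h2 h3
        simp only []
        omega)
      (by
        rw [List.pairwise_reverse]
        exact (PySem.List.pairwise_lt_pyRange_one 0 (w * h)).imp (fun hab => by simp only []; omega))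
      (fun i2 hi2 => PySem.List.mem_pyRange_one.mp (List.mem_reverse.mp hi2))
      (fun m hm0 hmn => List.mem_reverse.mpr (PySem.List.mem_pyRange_one.mpr ⟨hm0, hmn⟩))


lemma pv_fdiv_nonpos (a b : Int) (ha : 0 ≤ a) (hb : b < 0) : PySem.Int.floordiv a b ≤ 0 := by
  have h1 := PySem.Int.floordiv_mul_add_mod a b
  have h2 := PySem.Int.mod_neg_bounds (a := a) hb
  by_contra hc
  have h3 : PySem.Int.floordiv a b * b ≤ 1 * b :=
    mul_le_mul_of_nonpos_right (by omega) hb.le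
  linarith

lemma pv_mu_le_fuel (w h dx dy x y : Int) (len : Nat) (hw : 0 < w) (hh : h ≤ (len : Int))
    (hx0 : 0 ≤ x) (hxw : x < w) (hy0 : 0 ≤ y) (hyh : y < h) :
    pvMu w h dx dy x y ≤ len + w.toNat + 2 := by
  unfold pvMu
  split_ifs <;> omega

lemma pv_addSeatA_eq (cs : List Char) (stride : Int) (part2 : Bool)
    (x y dx dy maxX maxY : Int) (fuel : Nat) (l : List Int) :
    pvAddSeatA cs stride part2 x y dx dy maxX maxY fuel l =
      l ++ (pvFindSeatA cs stride part2 dx dy maxX maxY fuel x y).toList := by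
  unfold pvAddSeatA
  cases pvFindSeatA cs stride part2 dx dy maxX maxY fuel x y <;> simp

lemma pv_filterMap_eq_flatMap {α β : Type} (f : α → Option β) (l : List α) :
    l.filterMap f = (l.map f).flatMap Option.toList := by
  induction l with
  | nil => rfl
  | cons a tl ih => cases ha : f a <;> simp [ha, ih]

lemma pv_cell_eq (cs : List Char) (w h : Int) (part2 : Bool) (x y : Int)
    (hw : 0 < w) (hh : h ≤ (cs.length : Int))
    (hx0 : 0 ≤ x) (hxw : x < w) (hy0 : 0 ≤ y) (hyh : y < h) :
    pvAddSeatA cs w part2 x y 1 1 (w - 1) (h - 1) (cs.length + w.toNat + 2)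
      (pvAddSeatA cs w part2 x y 0 1 (w - 1) (h - 1) (cs.length + w.toNat + 2)
        (pvAddSeatA cs w part2 x y (-1) 1 (w - 1) (h - 1) (cs.length + w.toNat + 2)
          (pvAddSeatA cs w part2 x y 1 0 (w - 1) (h - 1) (cs.length + w.toNat + 2)
            (pvAddSeatA cs w part2 x y (-1) 0 (w - 1) (h - 1) (cs.length + w.toNat + 2)
              (pvAddSeatA cs w part2 x y 1 (-1) (w - 1) (h - 1) (cs.length + w.toNat + 2)
                (pvAddSeatA cs w part2 x y 0 (-1) (w - 1) (h - 1) (cs.length + w.toNat + 2)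
                  (pvAddSeatA cs w part2 x y (-1) (-1) (w - 1) (h - 1)
                    (cs.length + w.toNat + 2) []))))))) =
    (pvDirs.map (fun d =>
        pvSweep cs w h d.1 d.2 part2
          (if d.2 < 0 ∨ (d.2 = 0 ∧ d.1 < 0) then PySem.List.pyRange 0 (w * h) 1
           else PySem.List.pyRange (w * h - 1) (-1) (-1)))).filterMap
      (fun t => t.getD (y * w + x).toNat none) := by
  have hv : ∀ dx dy : Int, (dx, dy) ∈ pvDirs →
      pvFindSeatA cs w part2 dx dy (w - 1) (h - 1) (cs.length + w.toNat + 2) x y =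
        pvVis cs w h dx dy part2 x y := by
    intro dx dy hd
    simp only [pvDirs, List.mem_cons, List.not_mem_nil, or_false, Prod.mk.injEq] at hd
    rcases hd with ⟨h1,h2⟩|⟨h1,h2⟩|⟨h1,h2⟩|⟨h1,h2⟩|⟨h1,h2⟩|⟨h1,h2⟩|⟨h1,h2⟩|⟨h1,h2⟩ <;>
      subst h1 <;> subst h2 <;>
      exact pv_findA_eq_vis cs w h _ _ part2 hw (by norm_num) (by norm_num) (by norm_num)
        (by norm_num) (by norm_num) _ x y hx0 hxw hy0 hyh
        (pv_mu_le_fuel w h _ _ x y cs.length hw hh hx0 hxw hy0 hyh)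
  have hTab : ∀ dx dy : Int, (dx, dy) ∈ pvDirs →
      (pvSweep cs w h dx dy part2
          (if dy < 0 ∨ (dy = 0 ∧ dx < 0) then PySem.List.pyRange 0 (w * h) 1
           else PySem.List.pyRange (w * h - 1) (-1) (-1))).getD (y * w + x).toNat none =
        pvVis cs w h dx dy part2 x y := by
    intro dx dy hd
    obtain ⟨hb1, hb2⟩ := pv_grid_index_bounds w h x y hw hx0 hxw hy0 hyh
    have hs := pv_sweep_getD cs w h dx dy part2 (y * w + x) hw hd hb1 hb2
    obtain ⟨hc1, hc2⟩ := pv_coords w x y hw hx0 hxw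
    rw [hc1, hc2] at hs
    exact hs
  rw [pv_filterMap_eq_flatMap, List.map_map]
  have hmap : (pvDirs.map ((fun t : Array (Option Int) => t.getD (y * w + x).toNat none) ∘
      (fun d : Int × Int =>
        pvSweep cs w h d.1 d.2 part2
          (if d.2 < 0 ∨ (d.2 = 0 ∧ d.1 < 0) then PySem.List.pyRange 0 (w * h) 1
           else PySem.List.pyRange (w * h - 1) (-1) (-1))))) =
      pvDirs.map (fun d => pvVis cs w h d.1 d.2 part2 x y) := by
    refine List.map_congr_left ?_
    intro d hd
    obtain ⟨dx, dy⟩ := d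
    simp only [Function.comp_apply]
    exact hTab dx dy hd
  rw [hmap]
  rw [pv_addSeatA_eq, pv_addSeatA_eq, pv_addSeatA_eq, pv_addSeatA_eq, pv_addSeatA_eq,
    pv_addSeatA_eq, pv_addSeatA_eq, pv_addSeatA_eq]
  rw [hv (-1) (-1) (by simp [pvDirs]), hv 0 (-1) (by simp [pvDirs]), hv 1 (-1) (by simp [pvDirs]),
    hv (-1) 0 (by simp [pvDirs]), hv 1 0 (by simp [pvDirs]), hv (-1) 1 (by simp [pvDirs]),
    hv 0 1 (by simp [pvDirs]), hv 1 1 (by simp [pvDirs])]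
  simp [pvDirs, List.append_assoc]

-- ===== VERDICT (by name: the statement is the Claim_ definition above) =====
theorem create_seat_lookups_spec : Claim_equal_create_seat_lookups := by
  intro layout stride part2 _ hpre
  have hstride : stride ≠ 0 := hpre
  unfold Spec_create_seat_lookups
  simp only [create_seat_lookups, create_seat_lookups_alt]
  have hlen0 : (0 : Int) ≤ (layout.toList.length : Int) := Int.natCast_nonneg _
  rcases lt_trichotomy stride 0 with hneg | hz | hpos
  · have hfd : PySem.Int.floordiv (layout.toList.length : Int) stride ≤ 0 :=
      pv_fdiv_nonpos _ _ hlen0 hneg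
    rw [show PySem.Int.floordiv (layout.toList.length : Int) stride - 1 + 1 =
        PySem.Int.floordiv (layout.toList.length : Int) stride from by ring,
      show max (PySem.Int.floordiv (layout.toList.length : Int) stride) 0 = 0 from
        max_eq_right hfd]
    rw [PySem.List.pyRange_one_eq_nil hfd, PySem.List.pyRange_one_eq_nil (le_refl (0 : Int))]
    simp
  · exact absurd hz hstride
  · have hh0 : 0 ≤ PySem.Int.floordiv (layout.toList.length : Int) stride := by
      rw [PySem.Int.floordiv_eq_ediv_of_pos hpos]
      exact Int.ediv_nonneg hlen0 hpos.le
    have hhlen : PySem.Int.floordiv (layout.toList.length : Int) stride ≤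
        (layout.toList.length : Int) := by
      rw [PySem.Int.floordiv_eq_ediv_of_pos hpos]
      exact Int.ediv_le_self _ hlen0
    rw [show PySem.Int.floordiv (layout.toList.length : Int) stride - 1 + 1 =
        PySem.Int.floordiv (layout.toList.length : Int) stride from by ring,
      show stride - 1 + 1 = stride from by ring,
      show max (PySem.Int.floordiv (layout.toList.length : Int) stride) 0 =
        PySem.Int.floordiv (layout.toList.length : Int) stride from max_eq_left hh0]
    simp only [PySem.List.foldl_append_singleton_eq_map, PySem.List.foldl_append_eq_flatMap,
      List.nil_append]
    rw [List.flatMap_def, List.flatMap_def]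
    refine congrArg List.flatten (List.map_congr_left ?_)
    intro y hy
    obtain ⟨hy0, hyh⟩ := PySem.List.mem_pyRange_one.mp hy
    refine List.map_congr_left ?_
    intro x hx
    obtain ⟨hx0, hxw⟩ := PySem.List.mem_pyRange_one.mp hx
    exact pv_cell_eq layout.toList stride (PySem.Int.floordiv (layout.toList.length : Int) stride)
      part2 x y hpos hhlen hx0 hxw hy0 hyh
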